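-- pv_equiv track=rewrite | github.com/SelinaYan0514/CS111--Intro_to_Computer_Science_I | PS_06/ps6pr4.py | min_change_day
-- ===== SOURCE A (Python) =====
-- def min_change_day(c):
--     """takes a list of 2 or more prices and computes and returns the day
--     (i.e., the index) of the minimum single-day absolute change in price
--     """
--     min_change = abs(c[1] - c[0])  # Initialize minimum change
--     min_index = 1  # Initialize index of minimum change
--     for i in range(2, len(c)):
--         change = abs(c[i] - c[i-1])
--         if change < min_change:
--             min_change = change
--             min_index = i
--     return min_index
-- ===== SOURCE B (Python) =====
-- def min_change_day(c):
--     """takes a list of 2 or more prices and computes and returns the day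
--     (i.e., the index) of the minimum single-day absolute change in price
--     """
--     days = sorted((abs(after - before), i)
--                   for i, (before, after) in enumerate(zip(c, c[1:]), 1))
--     return days[0][1]
-- ===== Notes on version B (the rewrite author's own statement) =====
-- stated objective: alternative
-- what changed: Replaces A's fused running-minimum tracking loop with a sort-based selection: pair each absolute single-day change with its day via enumerate(zip(c, c[1:]), 1), sort the (change, day) tuples lexicographically, and return the day component of the first tuple; lexicographic tuple order reproduces A's strict-< earliest-minimum tie rule.
-- outside the precondition, e.g. on min_change_day([1]): A raises IndexError, B raises IndexError
import Mathlib
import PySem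

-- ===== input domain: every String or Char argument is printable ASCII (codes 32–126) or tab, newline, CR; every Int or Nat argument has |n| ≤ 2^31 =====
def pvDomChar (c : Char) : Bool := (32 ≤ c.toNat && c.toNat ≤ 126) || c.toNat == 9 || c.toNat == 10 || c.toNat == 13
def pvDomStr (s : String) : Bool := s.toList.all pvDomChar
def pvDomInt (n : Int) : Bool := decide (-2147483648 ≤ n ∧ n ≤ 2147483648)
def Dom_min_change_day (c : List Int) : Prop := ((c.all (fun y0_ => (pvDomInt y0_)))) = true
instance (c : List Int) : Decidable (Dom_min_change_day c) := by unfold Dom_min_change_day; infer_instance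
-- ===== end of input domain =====

-- B replaces A's fused running-minimum loop by sort-based selection: build (change, day)
-- tuples, sort them lexicographically, return the day of the first.  Objective: alternative.

-- ===== PORT A =====
-- A's fused loop: track (min_change, min_index) over i = 2 .. len(c)-1.
def min_change_day (c : List Int) : Int :=
  let min_change : Int := |PySem.List.pyGetD c 1 0 - PySem.List.pyGetD c 0 0|
  let s := (PySem.List.pyRange 2 c.length 1).foldl
    (fun (s : Int × Int) i =>
      let change := |PySem.List.pyGetD c i 0 - PySem.List.pyGetD c (i-1) 0|
      if change < s.1 then (change, i) else s)
    (min_change, 1)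
  s.2

-- ===== PORT B =====
-- B: days = sorted((abs(after-before), i) for i,(before,after) in enumerate(zip(c, c[1:]), 1));
-- return days[0][1].  Python's tuple sort is lexicographic: sorted2 with fst/snd keys.
def min_change_day_alt (c : List Int) : Int :=
  let pairs := (PySem.List.enumerate (c.zip (PySem.List.slice c (some 1) none)) 1).map
      (fun p => (|p.2.2 - p.2.1|, p.1))
  let days := PySem.List.sorted2 pairs (fun p => p.1) (fun p => p.2) false
  match days.head? with
  | some d => d.2
  | none => 0   -- unreachable under Pre_: days[0] raises IndexError on the empty list

-- ===== PRECONDITION & SPEC =====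
-- A indexes c[1] (and B indexes days[0]), so both raise IndexError on lists shorter than 2.
def Pre_min_change_day (c : List Int) : Prop := 2 ≤ c.length
instance (c : List Int) : Decidable (Pre_min_change_day c) := by unfold Pre_min_change_day; infer_instance
def pvWitness_min_change_day : List Int := [5, 3, 4, 4]

def Spec_min_change_day (c : List Int) (out : Int) : Prop := out = min_change_day_alt c
instance (c : List Int) (out : Int) : Decidable (Spec_min_change_day c out) := by unfold Spec_min_change_day; infer_instance

-- ===== CLAIM (what is proved, stated in full; the proofs are below) =====
def Claim_equal_min_change_day : Prop := ∀ (c : List Int), Dom_min_change_day c → Pre_min_change_day c → Spec_min_change_day c (min_change_day c)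

-- ===== LEMMAS AND PROOFS =====

-- Python's tuple sort (sorted2 with fst/snd keys) is the sort by the lexicographic key.
theorem pv_sorted2_eq_sorted_lex (xs : List (Int × Int)) :
    PySem.List.sorted2 xs (fun p => p.1) (fun p => p.2) false
      = PySem.List.sorted xs (fun p => (toLex p : Int ×ₗ Int)) false := by
  rw [PySem.List.sorted_eq_foldl_insertBy]
  have hbe : (fun (a b : Int × Int) => decide (a.1 < b.1) || (!decide (b.1 < a.1) && decide (a.2 < b.2)))
      = (fun a b => decide ((toLex a : Int ×ₗ Int) < toLex b)) := by
    funext a b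
    by_cases h1 : a.1 < b.1 <;> by_cases h2 : b.1 < a.1 <;> by_cases h3 : a.2 < b.2 <;>
      simp [h1, h2, h3, Prod.Lex.lt_iff] <;> omega
  show List.foldl (fun acc x => PySem.List.insertBy
      (fun (a b : Int × Int) => decide (a.1 < b.1) || (!decide (b.1 < a.1) && decide (a.2 < b.2)))
      x acc) [] xs = _
  rw [hbe]

-- Invariant of A's fused loop, for an arbitrary diff function D and upper bound b:
-- after processing indices 2..b-1, the state (m, j) satisfies: m is a member of and a lower
-- bound for the table L = [D 1, …, D (b-1)], the first occurrence of m in L is at j-1, and 1 ≤ j.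
theorem pv_loop_inv (D : Int → Int) :
    ∀ (k : Nat),
      let b : Int := 2 + (k : Int)
      let L := (PySem.List.pyRange 1 b 1).map D
      let s := (PySem.List.pyRange 2 b 1).foldl
        (fun (s : Int × Int) i => if D i < s.1 then (D i, i) else s) (D 1, 1)
      s.1 ∈ L ∧ (∀ y ∈ L, s.1 ≤ y) ∧
        PySem.List.index? L s.1 = some (s.2 - 1).toNat ∧ 1 ≤ s.2 := by
  intro k
  induction k with
  | zero =>
      simp only [Nat.cast_zero, add_zero]
      rw [show PySem.List.pyRange 2 2 1 = [] from PySem.List.pyRange_one_eq_nil (by omega),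
        show PySem.List.pyRange 1 2 1 = [1] from PySem.List.pyRange_one_singleton 1]
      simp
  | succ n ih =>
      simp only at ih ⊢
      obtain ⟨hmem, hlb, hidx, hpos⟩ := ih
      set b : Int := 2 + (n : Int) with hb
      have hcast : 2 + ((n + 1 : Nat) : Int) = b + 1 := by push_cast; omega
      rw [hcast,
        PySem.List.pyRange_one_succ_right (a := 2) (b := b) (by omega),
        PySem.List.pyRange_one_succ_right (a := 1) (b := b) (by omega)]
      rw [List.foldl_append, List.map_append]
      set s := (PySem.List.pyRange 2 b 1).foldl
        (fun (s : Int × Int) i => if D i < s.1 then (D i, i) else s) (D 1, 1) with hs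
      set L := (PySem.List.pyRange 1 b 1).map D with hL
      simp only [List.foldl_cons, List.foldl_nil, List.map_cons, List.map_nil]
      by_cases hlt : D b < s.1
      · rw [if_pos hlt]
        have hnot : D b ∉ L := by
          intro hin
          exact absurd (hlb _ hin) (by omega)
        refine ⟨by simp, ?_, ?_, by omega⟩
        · intro y hy
          rcases List.mem_append.mp hy with h | h
          · exact le_trans (le_of_lt hlt) (hlb _ h)
          · simp at h; omega
        · rw [PySem.List.index?_append_singleton_self L _ hnot]
          have hlen : L.length = (b - 1).toNat := by
            simp [hL, PySem.List.length_pyRange_one]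
          simp [hlen]
      · rw [if_neg hlt]
        refine ⟨List.mem_append_left _ hmem, ?_, ?_, hpos⟩
        · intro y hy
          rcases List.mem_append.mp hy with h | h
          · exact hlb _ h
          · simp at h; omega
        · rw [PySem.List.index?_append_of_mem _ hmem]
          exact hidx

-- The entries of A's diff table L: L[j] = D (j + 1).
theorem pv_L_get (D : Int → Int) (b : Int) (j : Nat)
    (hj : j < ((PySem.List.pyRange 1 b 1).map D).length) :
    ((PySem.List.pyRange 1 b 1).map D)[j] = D (1 + (j : Int)) := by
  simp only [PySem.List.pyRange_of_pos 1 b (by norm_num : (0:Int) < 1)] at hj ⊢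
  simp [List.getElem_map, List.getElem_range]

-- Membership in B's pairs list: exactly the pairs (D i, i) for 1 ≤ i < len c.
theorem pv_pairs_mem_iff (c : List Int) (p : Int × Int) :
    (p ∈ (PySem.List.enumerate (c.zip (PySem.List.slice c (some 1) none)) 1).map
        (fun p => (|p.2.2 - p.2.1|, p.1)))
      ↔ ∃ i : Int, 1 ≤ i ∧ i < (c.length : Int) ∧
          p = (|PySem.List.pyGetD c i 0 - PySem.List.pyGetD c (i-1) 0|, i) := by
  rw [PySem.List.slice_from_one, List.mem_map]
  constructor
  · rintro ⟨q, hq, rfl⟩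
    rw [PySem.List.mem_enumerate_iff] at hq
    obtain ⟨k, hk, rfl⟩ := hq
    rw [List.length_zip, List.length_tail] at hk
    have hkk : k + 1 < c.length := by omega
    refine ⟨1 + (k : Int), by omega, by exact_mod_cast (by omega : (1:Int) + k < (c.length : Int)), ?_⟩
    have e1 : PySem.List.pyGetD c (1 + (k : Int)) 0 = ((c)[k + 1]'hkk) := by
      rw [PySem.List.pyGetD_eq_getElem c 0 (by omega) (by exact_mod_cast (by omega : (1:Int) + k < (c.length : Int)))]
      congr 1
      omega
    have e2 : PySem.List.pyGetD c (1 + (k : Int) - 1) 0 = ((c)[k]'(by omega)) := by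
      rw [PySem.List.pyGetD_eq_getElem c 0 (by omega) (by exact_mod_cast (by omega : (1:Int) + k - 1 < (c.length : Int)))]
      congr 1
      omega
    simp only [List.getElem_zip, List.getElem_tail, e1, e2]
  · rintro ⟨i, h1, h2, rfl⟩
    have hi1 : i.toNat - 1 + 1 < c.length := by omega
    refine ⟨(1 + ((i.toNat - 1 : Nat) : Int), (((c)[i.toNat - 1]'(by omega)), ((c)[i.toNat - 1 + 1]'hi1))), ?_, ?_⟩
    · rw [PySem.List.mem_enumerate_iff]
      refine ⟨i.toNat - 1, by rw [List.length_zip, List.length_tail]; omega, ?_⟩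
      rw [List.getElem_zip, List.getElem_tail]
    · have e1 : PySem.List.pyGetD c i 0 = ((c)[i.toNat - 1 + 1]'hi1) := by
        rw [PySem.List.pyGetD_eq_getElem c 0 (by omega) (by omega)]
        congr 1
        omega
      have e2 : PySem.List.pyGetD c (i - 1) 0 = ((c)[i.toNat - 1]'(by omega)) := by
        rw [PySem.List.pyGetD_eq_getElem c 0 (by omega) (by omega)]
        congr 1
        omega
      simp only [e1, e2]
      congr 1
      omega

-- ===== VERDICT (by name: the statement is the Claim_ definition above) =====
theorem min_change_day_spec : Claim_equal_min_change_day := by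
  intro c _ hpre
  unfold Spec_min_change_day min_change_day min_change_day_alt
  have h2 : 2 ≤ c.length := hpre
  set D : Int → Int := fun i => |PySem.List.pyGetD c i 0 - PySem.List.pyGetD c (i-1) 0| with hD
  have hD1 : |PySem.List.pyGetD c 1 0 - PySem.List.pyGetD c 0 0| = D 1 := by simp [hD]
  obtain ⟨k, hk⟩ : ∃ k : Nat, (c.length : Int) = 2 + (k : Int) := ⟨c.length - 2, by omega⟩
  have hinv := pv_loop_inv D k
  simp only at hinv
  rw [← hk] at hinv
  obtain ⟨hmem, hlb, hidx, hpos⟩ := hinv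
  set L := (PySem.List.pyRange 1 (c.length : Int) 1).map D with hL
  set s := (PySem.List.pyRange 2 (c.length : Int) 1).foldl
    (fun (s : Int × Int) i => if D i < s.1 then (D i, i) else s) (D 1, 1) with hs
  simp only [hD1]
  rw [show (PySem.List.pyRange 2 (c.length : Int) 1).foldl
      (fun (s : Int × Int) i =>
        if |PySem.List.pyGetD c i 0 - PySem.List.pyGetD c (i-1) 0| < s.1
        then (|PySem.List.pyGetD c i 0 - PySem.List.pyGetD c (i-1) 0|, i) else s) (D 1, 1) = s from rfl]
  -- facts about L and A's final state
  have hLlen : L.length = ((c.length : Int) - 1).toNat := by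
    simp [hL, PySem.List.length_pyRange_one]
  obtain ⟨ht0, hLt0, hfirst⟩ := PySem.List.getElem_of_index?_eq_some hidx
  have hs2 : s.2 = ((s.2 - 1).toNat : Int) + 1 := by omega
  have hs1 : s.1 = D s.2 := by
    rw [pv_L_get D (c.length : Int) _ ht0] at hLt0
    rw [← hLt0]
    congr 1
    omega
  have hs2lt : s.2 < (c.length : Int) := by
    have := ht0
    omega
  -- the members of L are exactly the D i for 1 ≤ i < len c
  have hDmemL : ∀ i : Int, 1 ≤ i → i < (c.length : Int) → D i ∈ L := by
    intro i hi1 hi2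
    have hj : (i - 1).toNat < L.length := by omega
    have := pv_L_get D (c.length : Int) (i - 1).toNat hj
    have hji : (1 : Int) + ((i - 1).toNat : Int) = i := by omega
    rw [hji] at this
    rw [← this]
    exact List.getElem_mem hj
  -- B's side: sorted2 is the lexicographic sort; name its head
  set pairs := (PySem.List.enumerate (c.zip (PySem.List.slice c (some 1) none)) 1).map
      (fun p => (|p.2.2 - p.2.1|, p.1)) with hpairs
  rw [pv_sorted2_eq_sorted_lex]
  have hne : pairs ≠ [] := by
    intro hnil
    have : (D 1, (1 : Int)) ∈ pairs := by
      rw [hpairs, pv_pairs_mem_iff]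
      exact ⟨1, le_refl 1, by omega, by simp [hD]⟩
    rw [hnil] at this
    exact absurd this (List.not_mem_nil)
  cases hdays : PySem.List.sorted pairs (fun p => (toLex p : Lex (Int × Int))) false with
  | nil =>
      exact absurd ((PySem.List.sorted_eq_nil_iff pairs _ false).mp hdays) hne
  | cons d t =>
      simp only [List.head?_cons]
      -- d is a member of pairs and a lexicographic lower bound
      have hdmem : d ∈ pairs := by
        have : d ∈ PySem.List.sorted pairs (fun p => (toLex p : Lex (Int × Int))) false := by
          rw [hdays]; exact List.mem_cons_self
        exact (PySem.List.mem_sorted _ _ _ _).mp this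
      have hdle : ∀ y ∈ pairs, (toLex d : Lex (Int × Int)) ≤ toLex y :=
        PySem.List.key_head_sorted_le pairs (fun p => (toLex p : Lex (Int × Int))) hdays
      rw [hpairs, pv_pairs_mem_iff] at hdmem
      obtain ⟨i₀, hi1, hi2, rfl⟩ := hdmem
      -- (s.1, s.2) is itself a pair
      have hspair : (s.1, s.2) ∈ pairs := by
        rw [hpairs, pv_pairs_mem_iff]
        exact ⟨s.2, by omega, hs2lt, by rw [hs1]⟩
      have h1 := hdle _ hspair
      rw [Prod.Lex.le_iff] at h1
      have h2 : s.1 ≤ D i₀ := hlb _ (hDmemL i₀ hi1 hi2)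
      have heq1 : D i₀ = s.1 := by
        rcases h1 with h | ⟨h, _⟩
        · exact absurd h2 (by simpa using h)
        · simpa using h
      have hi0le : i₀ ≤ s.2 := by
        rcases h1 with h | ⟨_, h⟩
        · exact absurd (by simpa using h) (not_lt.mpr h2)
        · simpa using h
      -- s.2 ≤ i₀ : the first occurrence of s.1 in L is at s.2 - 1
      have hnotlt : ¬ ((i₀ - 1).toNat < (s.2 - 1).toNat) := by
        intro hlt
        have hj : (i₀ - 1).toNat < L.length := by omega
        have hLj := pv_L_get D (c.length : Int) (i₀ - 1).toNat hj
        have hji : (1 : Int) + ((i₀ - 1).toNat : Int) = i₀ := by omega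
        rw [hji] at hLj
        exact hfirst _ hlt (by rw [hLj, heq1])
      have : s.2 = i₀ := by omega
      simp [this]
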